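-- pv_equiv track=rewrite | github.com/jgd78/Wordle-Solver | create_nerdle_list.py | filter_left_nums
-- ===== SOURCE A (Python) =====
-- def filter_left_nums(entry):
--
--     valid=True
--     if not entry[0].isnumeric():
--         valid=False
--
--     else:
--         last_op=False
--         for elt in entry:
--             valid=valid and (not last_op or elt.isnumeric())
--             last_op=not elt.isnumeric()
--
--     return valid
-- ===== SOURCE B (Python) =====
-- def filter_left_nums(entry):
--     if not entry[0].isnumeric():
--         return False
--     ops = [i for i, ch in enumerate(entry) if not ch.isnumeric()]
--     return all(b - a >= 2 for a, b in zip(ops, ops[1:]))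
-- ===== Notes on version B (the rewrite author's own statement) =====
-- stated objective: alternative
-- what changed: Instead of a stateful forward scan threading a last_op flag, B first materialises the list of positions of non-numeric characters and then validates that consecutive operator positions are at least 2 apart.
import Mathlib
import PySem

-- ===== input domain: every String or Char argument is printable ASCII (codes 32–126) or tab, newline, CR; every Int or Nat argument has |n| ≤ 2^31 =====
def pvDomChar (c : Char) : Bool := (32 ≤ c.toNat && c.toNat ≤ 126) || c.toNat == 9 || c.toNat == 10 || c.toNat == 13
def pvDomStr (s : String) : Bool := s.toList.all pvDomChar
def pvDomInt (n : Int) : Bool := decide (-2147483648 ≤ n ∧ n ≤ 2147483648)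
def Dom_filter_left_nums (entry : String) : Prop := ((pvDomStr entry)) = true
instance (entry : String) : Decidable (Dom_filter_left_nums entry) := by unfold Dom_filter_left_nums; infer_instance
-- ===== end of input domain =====

-- B replaces A's stateful scan (threading a last_op flag) with a staged
-- computation: collect the positions of the non-numeric characters, then
-- check consecutive operator positions are at least 2 apart; objective: alternative.

-- ===== PORT A =====
def filter_left_nums (entry : String) : Bool :=
  match PySem.Str.pyGet? entry 0 with
  | none => false  -- IndexError on empty entry; excluded by Pre_
  | some c0 =>
    if !PySem.Chars.isdigit c0 then
      false
    else
      (entry.toList.foldl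
        (fun (st : Bool × Bool) elt =>
          (st.1 && (!st.2 || PySem.Chars.isdigit elt), !PySem.Chars.isdigit elt))
        (true, false)).1

-- ===== PORT B =====
def filter_left_nums_alt (entry : String) : Bool :=
  match PySem.Str.pyGet? entry 0 with
  | none => false  -- IndexError on empty entry; excluded by Pre_
  | some c0 =>
    if !PySem.Chars.isdigit c0 then
      false
    else
      let ops := (PySem.List.enumerate entry.toList).filterMap
        (fun p => if !PySem.Chars.isdigit p.2 then some p.1 else none)
      (ops.zip ops.tail).all (fun p => decide (p.2 - p.1 ≥ 2))

-- ===== PRECONDITION & SPEC =====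
-- Pre_ excludes only the empty string, on which A (and B) raise IndexError at entry[0].
def Pre_filter_left_nums (entry : String) : Prop := entry ≠ ""
instance (entry : String) : Decidable (Pre_filter_left_nums entry) := by unfold Pre_filter_left_nums; infer_instance
def pvWitness_filter_left_nums : String := "12+3"

def Spec_filter_left_nums (entry : String) (out : Bool) : Prop := out = filter_left_nums_alt entry
instance (entry : String) (out : Bool) : Decidable (Spec_filter_left_nums entry out) := by unfold Spec_filter_left_nums; infer_instance

-- ===== CLAIM (what is proved, stated in full; the proofs are below) =====
def Claim_equal_filter_left_nums : Prop := ∀ (entry : String), Dom_filter_left_nums entry → Pre_filter_left_nums entry → Spec_filter_left_nums entry (filter_left_nums entry)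

-- ===== LEMMAS AND PROOFS =====

-- proof-only helper: "no two adjacent non-digit characters" as a pairwise predicate
def pvPairsAll (l : List Char) : Bool :=
  (l.zip l.tail).all (fun p => PySem.Chars.isdigit p.1 || PySem.Chars.isdigit p.2)

theorem pvPairsAll_cons_cons (c c' : Char) (cs : List Char) :
    pvPairsAll (c :: c' :: cs)
      = ((PySem.Chars.isdigit c || PySem.Chars.isdigit c') && pvPairsAll (c' :: cs)) := by
  simp [pvPairsAll]

-- A's loop on a nonempty list, starting from state (v, lop): the first component.
theorem foldl_scan_eq (cs : List Char) (c : Char) (v lop : Bool) :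
    ((c :: cs).foldl
      (fun (st : Bool × Bool) elt =>
        (st.1 && (!st.2 || PySem.Chars.isdigit elt), !PySem.Chars.isdigit elt))
      (v, lop)).1
    = (v && (!lop || PySem.Chars.isdigit c) && pvPairsAll (c :: cs)) := by
  induction cs generalizing c v lop with
  | nil => simp [pvPairsAll]
  | cons c' cs' ih =>
    rw [List.foldl_cons, ih, pvPairsAll_cons_cons]
    cases v <;> cases lop <;> cases h : PySem.Chars.isdigit c <;>
      simp

-- proof-only helpers: B's operator-position list and its gap check
def pvOps (k : Int) (l : List Char) : List Int :=
  (PySem.List.enumerate l k).filterMap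
    (fun p => if !PySem.Chars.isdigit p.2 then some p.1 else none)

def pvGapsOk (ops : List Int) : Bool :=
  (ops.zip ops.tail).all (fun p => decide (p.2 - p.1 ≥ 2))

theorem pvOps_cons (k : Int) (c : Char) (cs : List Char) :
    pvOps k (c :: cs)
      = if !PySem.Chars.isdigit c then k :: pvOps (k + 1) cs else pvOps (k + 1) cs := by
  simp only [pvOps, PySem.List.enumerate_cons, List.filterMap_cons]
  cases h : PySem.Chars.isdigit c <;> simp

theorem pvOps_cons_digit (k : Int) (c : Char) (cs : List Char)
    (h : PySem.Chars.isdigit c = true) : pvOps k (c :: cs) = pvOps (k + 1) cs := by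
  simp [pvOps_cons, h]

theorem pvOps_cons_op (k : Int) (c : Char) (cs : List Char)
    (h : PySem.Chars.isdigit c = false) : pvOps k (c :: cs) = k :: pvOps (k + 1) cs := by
  simp [pvOps_cons, h]

theorem pvGapsOk_cons_cons (a m : Int) (rest : List Int) :
    pvGapsOk (a :: m :: rest) = (decide (m - a ≥ 2) && pvGapsOk (m :: rest)) := by
  simp [pvGapsOk]

-- every operator position produced from offset k is ≥ k
theorem pvOps_head_ge (k : Int) (l : List Char) (m : Int) (rest : List Int)
    (h : pvOps k l = m :: rest) : k ≤ m := by
  induction l generalizing k with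
  | nil => simp [pvOps] at h
  | cons c cs ih =>
    rw [pvOps_cons] at h
    split at h
    · injection h with h1 _; omega
    · have := ih (k + 1) h; omega

-- the gap check on operator positions is the adjacent-pair predicate
theorem pvGapsOk_eq_pairsAll (k : Int) (l : List Char) :
    pvGapsOk (pvOps k l) = pvPairsAll l := by
  induction l generalizing k with
  | nil => simp [pvOps, pvGapsOk, pvPairsAll]
  | cons c cs ih =>
    cases hc : PySem.Chars.isdigit c with
    | true =>
      rw [pvOps_cons_digit _ _ _ hc, ih (k + 1)]
      cases cs with
      | nil => simp [pvPairsAll]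
      | cons c' cs' => rw [pvPairsAll_cons_cons, hc]; simp
    | false =>
      rw [pvOps_cons_op _ _ _ hc]
      cases cs with
      | nil => simp [pvOps, pvGapsOk, pvPairsAll]
      | cons c' cs' =>
        rw [pvPairsAll_cons_cons, hc, Bool.false_or]
        cases hc' : PySem.Chars.isdigit c' with
        | true =>
          have hrec : pvOps (k + 1) (c' :: cs') = pvOps (k + 1 + 1) cs' :=
            pvOps_cons_digit _ _ _ hc'
          rw [hrec]
          cases hops : pvOps (k + 1 + 1) cs' with
          | nil => simp [pvGapsOk, ← ih (k + 1), hrec, hops]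
          | cons m rest =>
            have hge := pvOps_head_ge (k + 1 + 1) cs' m rest hops
            rw [pvGapsOk_cons_cons]
            have hd : decide (m - k ≥ 2) = true := by simp; omega
            rw [hd, Bool.true_and, ← hops, ← hrec, ih (k + 1)]
            simp
        | false =>
          have hrec : pvOps (k + 1) (c' :: cs') = (k + 1) :: pvOps (k + 1 + 1) cs' :=
            pvOps_cons_op _ _ _ hc'
          rw [hrec, pvGapsOk_cons_cons]
          have hd : decide ((k + 1) - k ≥ 2) = false := by
            simp only [decide_eq_false_iff_not]; omega
          rw [hd, Bool.false_and]
          simp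

-- ===== VERDICT (by name: the statement is the Claim_ definition above) =====
theorem filter_left_nums_spec : Claim_equal_filter_left_nums := by
  intro entry _ _
  unfold Spec_filter_left_nums filter_left_nums filter_left_nums_alt
  cases h : PySem.Str.pyGet? entry 0 with
  | none => rfl
  | some c0 =>
    simp only
    split
    · rfl
    · have h0 : entry.toList[0]? = some c0 := by
        simpa [PySem.Str.pyGet?, PySem.List.pyGet?_zero] using h
      cases hl : entry.toList with
      | nil => simp [hl] at h0
      | cons c cs =>
        rw [hl] at h0
        simp at h0
        subst h0
        rw [foldl_scan_eq]
        show _ = pvGapsOk (pvOps 0 (c :: cs))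
        rw [pvGapsOk_eq_pairsAll]
        simp
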